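-- pv_equiv track=rewrite | github.com/Arsen1302/Code-copy-detector | TestData/solutions/problem_1625_2.py | solution_1625_2
-- ===== SOURCE A (Python) =====
-- from typing import List
--
-- def solution_1625_2(grid: List[List[int]]) -> int:
--     n = len(grid)
--     pairs = 0
--
--     for i in range(n):
--         for j in range(n):
--             for k in range(n):
--                 if grid[i][k] != grid[k][j]:
--                     break
--             else:
--                 pairs += 1
--
--     return pairs
-- ===== SOURCE B (Python) =====
-- def solution_1625_2(grid):
--     n = len(grid)
--     counts = {}
--     for row in grid:
--         key = tuple(row[:n])
--         counts[key] = counts.get(key, 0) + 1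
--     pairs = 0
--     for j in range(n):
--         col = tuple(grid[k][j] for k in range(n))
--         pairs += counts.get(col, 0)
--     return pairs
-- ===== Notes on version B (the rewrite author's own statement) =====
-- stated objective: faster
-- what changed: Instead of comparing row i to column j element by element for every (i,j) (triple loop), B hashes each row prefix of length n into a dict of counts and looks up each column tuple once.
-- outside the precondition, e.g. on solution_1625_2([[1, 2], [0]]): A returns 0, B raises IndexError
import Mathlib
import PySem

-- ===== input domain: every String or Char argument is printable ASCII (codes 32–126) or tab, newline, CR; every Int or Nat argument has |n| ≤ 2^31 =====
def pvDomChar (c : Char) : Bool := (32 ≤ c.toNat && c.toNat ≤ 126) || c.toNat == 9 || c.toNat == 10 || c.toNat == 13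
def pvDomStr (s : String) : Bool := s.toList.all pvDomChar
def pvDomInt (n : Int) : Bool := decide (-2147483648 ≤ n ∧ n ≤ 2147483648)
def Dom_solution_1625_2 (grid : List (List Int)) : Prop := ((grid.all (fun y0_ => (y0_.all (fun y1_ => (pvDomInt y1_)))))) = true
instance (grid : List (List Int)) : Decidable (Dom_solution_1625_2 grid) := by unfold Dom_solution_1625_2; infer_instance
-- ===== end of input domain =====

-- B replaces A's O(n^3) triple loop by a dict of row-prefix counts plus one lookup per column (measured faster).


-- ===== PORT A =====
-- grid[i][k] with Nat loop indices cast to Int; pyGetD is exact here because Pre_ keeps every access in range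
def solution_1625_2 (grid : List (List Int)) : Int :=
  let n := grid.length
  (List.range n).foldl (fun (pairs : Int) (i : Nat) =>
    (List.range n).foldl (fun (pairs : Int) (j : Nat) =>
      -- 'for k in range(n): if grid[i][k] != grid[k][j]: break / else: pairs += 1'
      if (List.range n).all (fun (k : Nat) =>
           PySem.List.pyGetD (PySem.List.pyGetD grid (i : Int) []) (k : Int) 0 ==
           PySem.List.pyGetD (PySem.List.pyGetD grid (k : Int) []) (j : Int) 0)
      then pairs + 1 else pairs) pairs) 0

-- ===== PORT B =====
-- row[:n] with 0 ≤ n is List.take n; dict keyed by the row prefix, then one lookup per column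
def solution_1625_2_alt (grid : List (List Int)) : Int :=
  let n := grid.length
  let counts : PySem.Dict (List Int) Int :=
    grid.foldl (fun d row => d.insert (row.take n) (d.getD (row.take n) 0 + 1)) PySem.Dict.empty
  (List.range n).foldl (fun (pairs : Int) (j : Nat) =>
    pairs + counts.getD ((List.range n).map (fun (k : Nat) =>
      PySem.List.pyGetD (PySem.List.pyGetD grid (k : Int) []) (j : Int) 0)) 0) 0

-- ===== PRECONDITION & SPEC =====
-- Pre_ excludes ragged grids having a row shorter than len(grid): there the out-of-range access
-- raises IndexError in both programs, except that A may accidentally return when an earlier value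
-- mismatch breaks out of its inner loop before the short row is over-indexed (a value-dependent accident).
def Pre_solution_1625_2 (grid : List (List Int)) : Prop :=
  ∀ row ∈ grid, grid.length ≤ row.length
instance (grid : List (List Int)) : Decidable (Pre_solution_1625_2 grid) := by
  unfold Pre_solution_1625_2; infer_instance
def pvWitness_solution_1625_2 : List (List Int) := [[1, 2], [3, 4]]

def Spec_solution_1625_2 (grid : List (List Int)) (out : Int) : Prop := out = solution_1625_2_alt grid
instance (grid : List (List Int)) (out : Int) : Decidable (Spec_solution_1625_2 grid out) := by unfold Spec_solution_1625_2; infer_instance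

-- ===== CLAIM (what is proved, stated in full; the proofs are below) =====
def Claim_equal_solution_1625_2 : Prop := ∀ (grid : List (List Int)), Dom_solution_1625_2 grid → Pre_solution_1625_2 grid → Spec_solution_1625_2 grid (solution_1625_2 grid)

-- ===== LEMMAS AND PROOFS =====

-- bridge: sum of a map over List.range is a Finset.range sum
theorem pv_sum_map_range (n : Nat) (f : Nat → Int) :
    ((List.range n).map f).sum = ∑ i ∈ Finset.range n, f i := by
  induction n with
  | zero => simp
  | succ m ih => simp [List.range_succ, Finset.sum_range_succ, ih]

-- countP over List.range as a 0/1 Finset sum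
theorem pv_countP_range (n : Nat) (p : Nat → Bool) :
    (((List.range n).countP p : Nat) : Int) = ∑ j ∈ Finset.range n, (if p j then (1 : Int) else 0) := by
  induction n with
  | zero => simp
  | succ m ih =>
    rw [List.range_succ, List.countP_append, Finset.sum_range_succ, ← ih]
    push_cast [List.countP_cons]
    split_ifs <;> simp

-- the grid, read back by index
theorem pv_map_range_getElem (grid : List (List Int)) :
    (List.range grid.length).map (fun i => grid.getD i []) = grid := by
  apply List.ext_getElem
  · simp
  · intro i h1 h2
    simp [List.getD, List.getElem?_eq_getElem (by simpa using h1)]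

-- core pointwise fact: A's inner all-loop tests exactly "row-prefix i equals column j"
theorem pv_cond_eq (grid : List (List Int)) (hpre : Pre_solution_1625_2 grid)
    (i j : Nat) (hi : i < grid.length) :
    ((List.range grid.length).all (fun (k : Nat) =>
        PySem.List.pyGetD (PySem.List.pyGetD grid (i : Int) []) (k : Int) 0 ==
        PySem.List.pyGetD (PySem.List.pyGetD grid (k : Int) []) (j : Int) 0))
    = ((grid[i].take grid.length) == (List.range grid.length).map (fun (k : Nat) =>
        PySem.List.pyGetD (PySem.List.pyGetD grid (k : Int) []) (j : Int) 0)) := by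
  have hlen : grid.length ≤ grid[i].length := hpre _ (List.getElem_mem hi)
  rw [Bool.eq_iff_iff]
  simp only [List.all_eq_true, List.mem_range, PySem.List.pyGetD_natCast, beq_iff_eq]
  have hrow : ∀ k (hk : k < grid.length), grid.getD k [] = grid[k]'hk := by
    intro k hk
    simp [List.getD, List.getElem?_eq_getElem hk]
  constructor
  · intro hall
    apply List.ext_getElem
    · simp [Nat.min_eq_left hlen]
    · intro m hm1 hm2
      simp only [List.length_take, Nat.min_eq_left hlen] at hm1
      simp only [List.getElem_take, List.getElem_map, List.getElem_range]
      rw [← hall m hm1, hrow i hi]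
      exact (List.getD_eq_getElem _ _ (Nat.lt_of_lt_of_le hm1 hlen)).symm
  · intro heq k hk
    have h1 : (grid[i].take grid.length)[k]? = ((List.range grid.length).map (fun k =>
        (grid.getD k []).getD j 0))[k]? := by rw [heq]
    rw [List.getElem?_eq_getElem (by simp [Nat.min_eq_left hlen]; omega),
        List.getElem?_eq_getElem (by simpa using hk)] at h1
    simp only [Option.some.injEq, List.getElem_take, List.getElem_map, List.getElem_range] at h1
    rw [hrow i hi, List.getD_eq_getElem _ _ (Nat.lt_of_lt_of_le hk hlen)]
    exact h1

-- ===== VERDICT (by name: the statement is the Claim_ definition above) =====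
theorem solution_1625_2_spec : Claim_equal_solution_1625_2 := by
  intro grid _hdom hpre
  unfold Spec_solution_1625_2 solution_1625_2 solution_1625_2_alt
  set n := grid.length with hn
  -- B's counter: value at a key is the count of row prefixes
  have hcounts : ∀ v : List Int,
      (grid.foldl (fun d row => d.insert (row.take n) (d.getD (row.take n) 0 + 1))
        (PySem.Dict.empty : PySem.Dict (List Int) Int)).getD v 0
      = ((grid.map (fun r => r.take n)).count v : Int) := by
    intro v
    rw [← List.foldl_map (f := fun r : List Int => r.take n)
        (g := fun (d : PySem.Dict (List Int) Int) x => d.insert x (d.getD x 0 + 1))]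
    rw [PySem.Dict.getD_foldl_insert_add_one]
    simp
  simp only [hcounts]
  -- flatten both folds into sums
  rw [PySem.List.foldl_add (g := fun j : Nat => ((grid.map (fun r => r.take n)).count
      ((List.range n).map (fun (k : Nat) =>
        PySem.List.pyGetD (PySem.List.pyGetD grid (k : Int) []) (j : Int) 0)) : Int))]
  have hswap := PySem.List.foldl_congr_mem (l := List.range n) (init := (0 : Int))
      (f := fun (pairs : Int) (i : Nat) => (List.range n).foldl (fun (pairs : Int) (j : Nat) =>
        if (List.range n).all (fun (k : Nat) =>
             PySem.List.pyGetD (PySem.List.pyGetD grid (i : Int) []) (k : Int) 0 ==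
             PySem.List.pyGetD (PySem.List.pyGetD grid (k : Int) []) (j : Int) 0)
        then pairs + 1 else pairs) pairs)
      (g := fun (pairs : Int) (i : Nat) => pairs +
        (((List.range n).countP (fun (j : Nat) =>
            (List.range n).all (fun (k : Nat) =>
               PySem.List.pyGetD (PySem.List.pyGetD grid (i : Int) []) (k : Int) 0 ==
               PySem.List.pyGetD (PySem.List.pyGetD grid (k : Int) []) (j : Int) 0)) : Nat) : Int))
      (by intro acc i _; exact PySem.List.foldl_if_add_one _ _ _)
  rw [hswap]
  rw [PySem.List.foldl_add]
  simp only [zero_add]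
  -- counts over the mapped grid as counts over indices
  have hcount_idx : ∀ j : Nat,
      ((grid.map (fun r => r.take n)).count
        ((List.range n).map (fun (k : Nat) =>
          PySem.List.pyGetD (PySem.List.pyGetD grid (k : Int) []) (j : Int) 0)) : Int)
      = (((List.range n).countP (fun (i : Nat) => (grid.getD i []).take n ==
          ((List.range n).map (fun (k : Nat) =>
            PySem.List.pyGetD (PySem.List.pyGetD grid (k : Int) []) (j : Int) 0))) : Nat) : Int) := by
    intro j
    set col := (List.range n).map (fun (k : Nat) =>
      PySem.List.pyGetD (PySem.List.pyGetD grid (k : Int) []) (j : Int) 0) with hcol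
    rw [List.count]
    conv_lhs => rw [← pv_map_range_getElem grid, ← hn]
    rw [List.countP_map, List.countP_map]
    simp only [Function.comp_def]
  -- both sides as Finset sums of the same indicator, swapped
  rw [pv_sum_map_range, pv_sum_map_range]
  have hA : ∀ i ∈ Finset.range n, (((List.range n).countP (fun (j : Nat) =>
        (List.range n).all (fun (k : Nat) =>
           PySem.List.pyGetD (PySem.List.pyGetD grid (i : Int) []) (k : Int) 0 ==
           PySem.List.pyGetD (PySem.List.pyGetD grid (k : Int) []) (j : Int) 0)) : Nat) : Int)
      = ∑ j ∈ Finset.range n, (if (grid.getD i []).take n ==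
          ((List.range n).map (fun (k : Nat) =>
            PySem.List.pyGetD (PySem.List.pyGetD grid (k : Int) []) (j : Int) 0))
        then (1 : Int) else 0) := by
    intro i hi
    rw [Finset.mem_range] at hi
    rw [pv_countP_range]
    apply Finset.sum_congr rfl
    intro j _
    have hcond := pv_cond_eq grid hpre i j (by simpa [hn] using hi)
    have hg : grid.getD i [] = grid[i]'(by simpa [hn] using hi) := by
      simp [List.getD, List.getElem?_eq_getElem (show i < grid.length by simpa [hn] using hi)]
    rw [hn, hcond, hg]
  rw [Finset.sum_congr rfl hA]
  rw [Finset.sum_comm]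
  apply Finset.sum_congr rfl
  intro j _
  rw [hcount_idx j, pv_countP_range]
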